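-- pv_equiv track=rewrite | github.com/carogomezt/algorithms_project0 | Task4.py | get_telephone_marketing_numbers
-- ===== SOURCE A (Python) =====
-- def get_telephone_marketing_numbers(texts, calls):
--     text_senders = set([num[0] for num in texts])
--     text_receivers = set([num[1] for num in texts])
--     calls_telephone = set([num[0] for num in calls])
--     calls_receivers = set([num[1] for num in calls])
--
--     telemarketers = calls_telephone - text_senders - text_receivers - calls_receivers
--     telemarketers_list = list(telemarketers)
--     telemarketers_list.sort()
--
--     return telemarketers_list
-- ===== SOURCE B (Python) =====
-- def get_telephone_marketing_numbers(texts, calls):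
--     # one role table instead of four sets and a chained set difference
--     roles = {}  # number -> True while still a telemarketer candidate
--     for sender, receiver in texts:
--         roles[sender] = False
--         roles[receiver] = False
--     for caller, receiver in calls:
--         roles[receiver] = False
--         if caller not in roles:
--             roles[caller] = True
--     return sorted(num for num, ok in roles.items() if ok)
-- ===== Notes on version B (the rewrite author's own statement) =====
-- stated objective: alternative
-- what changed: Replaces the four comprehension-built sets and the chained set difference by a single dict mapping each number to a candidate/excluded flag maintained in two passes, then sorts the surviving candidates.
import Mathlib
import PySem

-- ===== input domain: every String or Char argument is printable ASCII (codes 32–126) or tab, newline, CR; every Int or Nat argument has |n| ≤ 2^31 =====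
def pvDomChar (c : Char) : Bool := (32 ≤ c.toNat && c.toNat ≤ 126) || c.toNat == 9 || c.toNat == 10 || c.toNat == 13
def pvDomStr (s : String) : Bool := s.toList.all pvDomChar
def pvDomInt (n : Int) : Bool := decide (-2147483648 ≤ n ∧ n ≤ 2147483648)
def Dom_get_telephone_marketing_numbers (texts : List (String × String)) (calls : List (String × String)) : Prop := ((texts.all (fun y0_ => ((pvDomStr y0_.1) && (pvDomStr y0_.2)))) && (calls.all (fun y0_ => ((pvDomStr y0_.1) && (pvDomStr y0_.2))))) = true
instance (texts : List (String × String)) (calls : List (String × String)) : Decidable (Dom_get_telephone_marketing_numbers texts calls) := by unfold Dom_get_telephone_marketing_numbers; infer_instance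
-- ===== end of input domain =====

-- B replaces A's four sets and chained set difference by one dict of candidate/excluded flags built in two passes; alternative decomposition, same cost.


-- ===== PORT A =====
def get_telephone_marketing_numbers (texts : List (String × String)) (calls : List (String × String)) : List String :=
  let text_senders := PySem.Set.ofList (texts.map (fun num => num.1))
  let text_receivers := PySem.Set.ofList (texts.map (fun num => num.2))
  let calls_telephone := PySem.Set.ofList (calls.map (fun num => num.1))
  let calls_receivers := PySem.Set.ofList (calls.map (fun num => num.2))
  let telemarketers := PySem.Set.diff (PySem.Set.diff (PySem.Set.diff calls_telephone text_senders) text_receivers) calls_receivers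
  -- list(telemarketers) followed by .sort(): the sort makes the set-iteration order irrelevant; exact as sorted(telemarketers)
  PySem.List.sorted telemarketers (fun x => x) false

-- ===== PORT B =====
-- roles[sender] = False; roles[receiver] = False
def gtmnTextStep (d : PySem.Dict String Bool) (p : String × String) : PySem.Dict String Bool :=
  (d.insert p.1 false).insert p.2 false

-- roles[receiver] = False; if caller not in roles: roles[caller] = True
def gtmnCallStep (d : PySem.Dict String Bool) (p : String × String) : PySem.Dict String Bool :=
  if (d.insert p.2 false).contains p.1 then d.insert p.2 false
  else (d.insert p.2 false).insert p.1 true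

def get_telephone_marketing_numbers_alt (texts : List (String × String)) (calls : List (String × String)) : List String :=
  let roles := calls.foldl gtmnCallStep (texts.foldl gtmnTextStep PySem.Dict.empty)
  PySem.List.sorted ((roles.items.filter (fun p => p.2)).map (fun p => p.1)) (fun x => x) false

-- ===== PRECONDITION & SPEC =====
def Spec_get_telephone_marketing_numbers (texts : List (String × String)) (calls : List (String × String)) (out : List String) : Prop := out = get_telephone_marketing_numbers_alt texts calls
instance (texts : List (String × String)) (calls : List (String × String)) (out : List String) : Decidable (Spec_get_telephone_marketing_numbers texts calls out) := by unfold Spec_get_telephone_marketing_numbers; infer_instance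

-- ===== CLAIM (what is proved, stated in full; the proofs are below) =====
def Claim_equal_get_telephone_marketing_numbers : Prop := ∀ (texts : List (String × String)) (calls : List (String × String)), Dom_get_telephone_marketing_numbers texts calls → Spec_get_telephone_marketing_numbers texts calls (get_telephone_marketing_numbers texts calls)

-- ===== LEMMAS AND PROOFS =====

-- the text pass writes `false` at every number it touches and leaves the rest alone
theorem gtmn_get?_foldTexts (texts : List (String × String)) (d : PySem.Dict String Bool) (k : String) :
    (texts.foldl gtmnTextStep d).get? k =
      if k ∈ texts.map (fun num => num.1) ∨ k ∈ texts.map (fun num => num.2) then some false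
      else d.get? k := by
  induction texts generalizing d with
  | nil => simp
  | cons p rest ih =>
    simp only [List.foldl_cons, ih, List.map_cons, List.mem_cons]
    by_cases h1 : k = p.1 <;> by_cases h2 : k = p.2 <;>
      simp only [gtmnTextStep, PySem.Dict.get?_insert, h1, h2] <;>
      split_ifs <;> first | rfl | tauto

-- the call pass: k ends `true` iff it was true already or entered fresh as a caller, and is never a receiver
theorem gtmn_get?_foldCalls (calls : List (String × String)) (d : PySem.Dict String Bool) (k : String) :
    (calls.foldl gtmnCallStep d).get? k = some true ↔
      ((d.get? k = some true ∨ (d.get? k = none ∧ k ∈ calls.map (fun num => num.1))) ∧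
        k ∉ calls.map (fun num => num.2)) := by
  induction calls generalizing d with
  | nil => simp
  | cons p rest ih =>
    simp only [List.foldl_cons, ih, List.map_cons, List.mem_cons]
    unfold gtmnCallStep
    by_cases hc : ((d.insert p.2 false).contains p.1) = true
    · rw [if_pos hc]
      by_cases h2 : k = p.2
      · simp [h2]
      · by_cases h1 : k = p.1
        · have hpr : p.1 ≠ p.2 := fun h => h2 (h1.trans h)
          have hmem : d.contains p.1 = true := by
            rw [PySem.Dict.contains_insert] at hc
            simpa [hpr] using hc
          have hne : ¬ d.get? p.1 = none := by
            rw [PySem.Dict.get?_eq_none_iff_contains, hmem]; simp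
          simp [PySem.Dict.get?_insert, h1, hpr]
          tauto
        · simp [PySem.Dict.get?_insert, h1, h2]
    · have hpr : p.1 ≠ p.2 := by
        intro h; rw [PySem.Dict.contains_insert] at hc; simp [h] at hc
      have hdn : d.get? p.1 = none := by
        rw [PySem.Dict.contains_insert] at hc
        rw [PySem.Dict.get?_eq_none_iff_contains]
        simp only [Bool.or_eq_true, not_or] at hc
        simp [hc.2]
      rw [if_neg hc]
      by_cases h2 : k = p.2
      · simp [PySem.Dict.get?_insert, h2, Ne.symm hpr]
      · by_cases h1 : k = p.1
        · subst h1
          simp [hpr, hdn]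
        · simp [PySem.Dict.get?_insert, h1, h2]

-- keys stay Nodup through both passes
theorem gtmn_nodup_keys_foldTexts (texts : List (String × String)) (d : PySem.Dict String Bool)
    (h : d.keys.Nodup) : (texts.foldl gtmnTextStep d).keys.Nodup := by
  induction texts generalizing d with
  | nil => exact h
  | cons p rest ih =>
    exact ih _ (PySem.Dict.nodup_keys_insert _ _ _ (PySem.Dict.nodup_keys_insert _ _ _ h))

theorem gtmn_nodup_keys_foldCalls (calls : List (String × String)) (d : PySem.Dict String Bool)
    (h : d.keys.Nodup) : (calls.foldl gtmnCallStep d).keys.Nodup := by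
  induction calls generalizing d with
  | nil => exact h
  | cons p rest ih =>
    apply ih
    unfold gtmnCallStep
    split
    · exact PySem.Dict.nodup_keys_insert _ _ _ h
    · exact PySem.Dict.nodup_keys_insert _ _ _ (PySem.Dict.nodup_keys_insert _ _ _ h)

-- membership in B's pre-sort list is exactly "flag true in the final dict"
theorem gtmn_mem_filtered (d : PySem.Dict String Bool) (hnd : d.keys.Nodup) (x : String) :
    x ∈ (d.items.filter (fun p => p.2)).map (fun p => p.1) ↔ d.get? x = some true := by
  constructor
  · intro hx
    rcases List.mem_map.1 hx with ⟨p, hp, hpx⟩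
    rcases List.mem_filter.1 hp with ⟨hpi, hpt⟩
    have hpe : p = (x, true) := by
      cases p
      simp at hpx hpt
      simp [hpx, hpt]
    rw [hpe] at hpi
    exact PySem.Dict.get?_of_mem_items _ hpi hnd
  · intro hx
    have hi : (x, true) ∈ d.items := PySem.Dict.mem_items_of_get?_eq_some _ hx
    exact List.mem_map.2 ⟨(x, true), List.mem_filter.2 ⟨hi, rfl⟩, rfl⟩

-- B's pre-sort list has no duplicates (it is a sublist of the keys)
theorem gtmn_nodup_filtered (d : PySem.Dict String Bool) (hnd : d.keys.Nodup) :
    ((d.items.filter (fun p => p.2)).map (fun p => p.1)).Nodup := by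
  have hsub : ((d.items.filter (fun p => p.2)).map (fun p => p.1)).Sublist
      (d.items.map (fun p => p.1)) := List.Sublist.map _ List.filter_sublist
  exact hnd.sublist hsub

-- the two pre-sort lists are permutations of each other
theorem gtmn_perm (texts calls : List (String × String)) :
    (PySem.Set.diff (PySem.Set.diff (PySem.Set.diff
        (PySem.Set.ofList (calls.map (fun num => num.1)))
        (PySem.Set.ofList (texts.map (fun num => num.1))))
        (PySem.Set.ofList (texts.map (fun num => num.2))))
        (PySem.Set.ofList (calls.map (fun num => num.2)))).Perm
      ((((calls.foldl gtmnCallStep (texts.foldl gtmnTextStep PySem.Dict.empty)).items.filter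
          (fun p => p.2)).map (fun p => p.1))) := by
  have hndA : (PySem.Set.diff (PySem.Set.diff (PySem.Set.diff
      (PySem.Set.ofList (calls.map (fun num => num.1)))
      (PySem.Set.ofList (texts.map (fun num => num.1))))
      (PySem.Set.ofList (texts.map (fun num => num.2))))
      (PySem.Set.ofList (calls.map (fun num => num.2)))).Nodup :=
    PySem.Set.nodup_diff _ _ (PySem.Set.nodup_diff _ _ (PySem.Set.nodup_diff _ _
      (PySem.Set.nodup_ofList _)))
  have hndK : ((calls.foldl gtmnCallStep (texts.foldl gtmnTextStep PySem.Dict.empty)).keys).Nodup :=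
    gtmn_nodup_keys_foldCalls _ _ (gtmn_nodup_keys_foldTexts _ _ (by simp))
  rw [List.perm_ext_iff_of_nodup hndA (gtmn_nodup_filtered _ hndK)]
  intro x
  rw [gtmn_mem_filtered _ hndK, gtmn_get?_foldCalls, gtmn_get?_foldTexts]
  simp only [PySem.Set.mem_diff, PySem.Set.mem_ofList]
  by_cases ht : x ∈ texts.map (fun num => num.1) ∨ x ∈ texts.map (fun num => num.2)
  · simp only [if_pos ht]
    constructor
    · rintro ⟨⟨⟨-, hts⟩, htr⟩, -⟩
      rcases ht with h | h
      · exact absurd h hts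
      · exact absurd h htr
    · rintro ⟨h1 | ⟨h1, -⟩, -⟩ <;> simp at h1
  · simp only [if_neg ht, PySem.Dict.get?_empty]
    rw [not_or] at ht
    constructor
    · rintro ⟨⟨⟨hcf, -⟩, -⟩, hcr⟩
      exact ⟨Or.inr ⟨trivial, hcf⟩, hcr⟩
    · rintro ⟨h1 | ⟨-, hcf⟩, hcr⟩
      · exact absurd h1 (by simp)
      · exact ⟨⟨⟨hcf, ht.1⟩, ht.2⟩, hcr⟩

-- ===== VERDICT (by name: the statement is the Claim_ definition above) =====
theorem get_telephone_marketing_numbers_spec : Claim_equal_get_telephone_marketing_numbers := by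
  intro texts calls _
  unfold Spec_get_telephone_marketing_numbers
  unfold get_telephone_marketing_numbers get_telephone_marketing_numbers_alt
  exact PySem.List.sorted_eq_sorted_of_perm _ _ _ (fun a b h => h) (gtmn_perm texts calls)
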